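-- pv_equiv track=rewrite | github.com/SiddheshP1996/GFG-POTD-Daily | 2023/05 GFG-POTD-Daily-December-2023/29 Check-If-A-String-Is-Repetition-Of-Its-Substring-Of-k-Length.py | kSubstrConcat
-- ===== SOURCE A (Python) =====
-- from collections import Counter
--
-- def kSubstrConcat(n, s, k):
--     # Your Code Here
--     if n % k != 0:
--         return 0
--
--     listOfString = []
--
--     for i in range(0, n, k):
--         elementOfSubString = s[i]
--
--         for j in range(1, k):
--             elementOfSubString += s[i + j]
--         listOfString.append(elementOfSubString)
--
--     dictionaryCount = Counter(listOfString)
--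
--     if len(dictionaryCount) > 2:
--         return 0
--
--     updateCount = 0
--
--     for i in dictionaryCount:
--         if dictionaryCount[i] > 1:
--             updateCount += 1
--
--     if updateCount == 2:
--         return 0
--
--     return 1
-- ===== SOURCE B (Python) =====
-- def kSubstrConcat(n, s, k):
--     # B: slice-based chunking + direct two-distinct/count-one test (no Counter, no per-char inner loop)
--     if n % k != 0:
--         return 0
--     chunks = [s[i:i + k] for i in range(0, n, k)]
--     uniq = list(dict.fromkeys(chunks))
--     if len(uniq) > 2:
--         return 0
--     if len(uniq) < 2:
--         return 1
--     return 1 if chunks.count(uniq[0]) == 1 or chunks.count(uniq[1]) == 1 else 0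
-- ===== Notes on version B (the rewrite author's own statement) =====
-- stated objective: simpler
-- what changed: B cuts each chunk with a single slice s[i:i+k] instead of A's per-character inner concatenation loop, and replaces the Counter plus repeated-key scan by an ordered dedup of the chunks and a direct count-equals-one test on the (at most two) distinct chunks.
-- outside the precondition, e.g. on kSubstrConcat(-6, 'abcdef', -2): A returns 0, B returns 1
import Mathlib
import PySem

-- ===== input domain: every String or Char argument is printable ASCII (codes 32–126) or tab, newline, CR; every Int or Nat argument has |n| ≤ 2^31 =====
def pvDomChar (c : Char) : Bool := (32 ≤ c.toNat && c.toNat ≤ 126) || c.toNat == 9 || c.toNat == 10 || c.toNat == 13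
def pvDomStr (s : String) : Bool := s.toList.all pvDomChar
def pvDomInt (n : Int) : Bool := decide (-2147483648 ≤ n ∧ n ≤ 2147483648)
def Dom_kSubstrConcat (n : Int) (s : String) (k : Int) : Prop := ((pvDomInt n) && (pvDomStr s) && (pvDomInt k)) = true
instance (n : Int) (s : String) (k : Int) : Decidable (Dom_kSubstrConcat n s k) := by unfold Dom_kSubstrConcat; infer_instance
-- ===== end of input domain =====

-- B cuts chunks with slices instead of A's per-character concatenation loop, and replaces the
-- Counter + repeated-keys scan by an ordered dedup plus a count-equals-one test on the (at most
-- two) distinct chunks: a simpler decomposition of the same check.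

-- ===== PORT A =====
def kSubstrConcat (n : Int) (s : String) (k : Int) : Int :=
  if PySem.Int.mod n k ≠ 0 then 0
  else
    let cs := s.toList
    let listOfString := (PySem.List.pyRange 0 n k).foldl (fun acc i =>
      let elementOfSubString :=
        (PySem.List.pyRange 1 k 1).foldl
          (fun e j => e ++ [PySem.List.pyGetD cs (i + j) ' '])
          [PySem.List.pyGetD cs i ' ']
      acc ++ [elementOfSubString]) ([] : List (List Char))
    let dictionaryCount := PySem.Dict.counter listOfString
    if (dictionaryCount.size : Int) > 2 then 0
    else
      let updateCount := dictionaryCount.keys.foldl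
        (fun c i => if dictionaryCount.getD i 0 > 1 then c + 1 else c) (0 : Int)
      if updateCount = 2 then 0 else 1

-- ===== PORT B =====
def kSubstrConcat_alt (n : Int) (s : String) (k : Int) : Int :=
  if PySem.Int.mod n k ≠ 0 then 0
  else
    let cs := s.toList
    let chunks := (PySem.List.pyRange 0 n k).map
      (fun i => PySem.List.slice cs (some i) (some (i + k)))
    let uniq := PySem.List.dedup chunks
    if uniq.length > 2 then 0
    else if uniq.length < 2 then 1
    else if chunks.count (PySem.List.pyGetD uniq 0 []) = 1
            ∨ chunks.count (PySem.List.pyGetD uniq 1 []) = 1 then 1 else 0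

-- ===== PRECONDITION & SPEC =====
-- Pre_ excludes k = 0 (ZeroDivisionError) and, when k divides n: k > 0 with n > len(s)
-- (IndexError), and k < 0 with n < 0, where A's per-character negative indexing wraps around
-- the string (an artefact of its indexing) or raises, while B's slicing yields empty chunks.
def Pre_kSubstrConcat (n : Int) (s : String) (k : Int) : Prop :=
  k ≠ 0 ∧ (PySem.Int.mod n k = 0 →
    ((0 < k → n ≤ (s.toList.length : Int)) ∧ (k < 0 → 0 ≤ n)))
instance (n : Int) (s : String) (k : Int) : Decidable (Pre_kSubstrConcat n s k) := by
  unfold Pre_kSubstrConcat; infer_instance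

def pvWitness_kSubstrConcat : Int × String × Int := (4, "abab", 2)

def Spec_kSubstrConcat (n : Int) (s : String) (k : Int) (out : Int) : Prop := out = kSubstrConcat_alt n s k
instance (n : Int) (s : String) (k : Int) (out : Int) : Decidable (Spec_kSubstrConcat n s k out) := by unfold Spec_kSubstrConcat; infer_instance

-- ===== CLAIM (what is proved, stated in full; the proofs are below) =====
def Claim_equal_kSubstrConcat : Prop := ∀ (n : Int) (s : String) (k : Int), Dom_kSubstrConcat n s k → Pre_kSubstrConcat n s k → Spec_kSubstrConcat n s k (kSubstrConcat n s k)

-- ===== LEMMAS AND PROOFS =====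

-- range(0, n, k) is empty for k > 0, n <= 0
lemma range_nil_pos (n k : Int) (hk : 0 < k) (hn : n ≤ 0) : PySem.List.pyRange 0 n k = [] := by
  rw [PySem.List.pyRange_of_pos _ _ hk]
  simp [show ¬(0:Int) < n by omega]

-- range(0, n, k) is empty for k < 0, 0 <= n
lemma range_nil_neg (n k : Int) (hk : k < 0) (hn : 0 ≤ n) : PySem.List.pyRange 0 n k = [] := by
  simp [PySem.List.pyRange, show ¬(0:Int) < k by omega, show k ≠ 0 by omega,
        show ¬ n < 0 by omega]


lemma drop_take_map (cs : List Char) (a m : Nat) (h : a + m ≤ cs.length) :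
    (cs.drop a).take m = (List.range m).map (fun t => cs.getD (a + t) ' ') := by
  apply List.ext_getElem
  · simp; omega
  · intro t h1 h2
    simp only [List.getElem_take, List.getElem_drop, List.getElem_map, List.getElem_range]
    rw [List.getD_eq_getElem]

lemma chunk_eq_slice (cs : List Char) (i k : Int) (hi : 0 ≤ i) (hk : 0 < k)
    (hle : i + k ≤ (cs.length : Int)) :
    (PySem.List.pyRange 1 k 1).foldl
      (fun e j => e ++ [PySem.List.pyGetD cs (i + j) ' '])
      [PySem.List.pyGetD cs i ' ']
    = PySem.List.slice cs (some i) (some (i + k)) := by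
  rw [PySem.List.foldl_append_singleton_eq_map]
  rw [PySem.List.slice_toNat _ hi (by omega)]
  rw [drop_take_map cs i.toNat ((i+k).toNat - i.toNat) (by omega)]
  rw [PySem.List.pyRange_one]
  have hm : (i+k).toNat - i.toNat = (k - 1).toNat + 1 := by omega
  rw [hm, List.range_succ_eq_map]
  simp only [List.map_cons, List.map_map, List.singleton_append, List.cons.injEq]
  constructor
  · rw [PySem.List.pyGetD_eq_getElem _ _ hi (by omega), List.getD_eq_getElem _ _ (by omega)]
    simp
  · apply List.map_congr_left
    intro t ht
    simp only [List.mem_range] at ht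
    simp only [Function.comp]
    rw [PySem.List.pyGetD_eq_getElem _ _ (by omega) (by omega),
        List.getD_eq_getElem _ _ (by omega)]
    congr 1
    omega


lemma decision_eq (L : List (List Char)) :
    (if ((PySem.Dict.counter L).size : Int) > 2 then (0:Int)
     else if (PySem.Dict.counter L).keys.foldl
        (fun c i => if (PySem.Dict.counter L).getD i 0 > 1 then c + 1 else c) (0 : Int) = 2
       then 0 else 1)
    = (if (PySem.List.dedup L).length > 2 then (0:Int)
       else if (PySem.List.dedup L).length < 2 then 1
       else if L.count (PySem.List.pyGetD (PySem.List.dedup L) 0 []) = 1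
               ∨ L.count (PySem.List.pyGetD (PySem.List.dedup L) 1 []) = 1 then 1 else 0) := by
  have hsize : (PySem.Dict.counter L).size = (PySem.List.dedup L).length := by
    simp [PySem.Dict.size, PySem.Dict.items_counter, PySem.List.dedup]
  have hfold : (PySem.Dict.counter L).keys.foldl
        (fun c i => if (PySem.Dict.counter L).getD i 0 > 1 then c + 1 else c) (0 : Int)
      = ((PySem.List.dedup L).countP (fun x => decide (1 < L.count x)) : Int) := by
    rw [PySem.List.foldl_ite_add_one, PySem.Dict.keys_counter]
    have : PySem.Set.ofList L = PySem.List.dedup L := by simp [PySem.List.dedup]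
    rw [this, zero_add]
    congr 1
    apply List.countP_congr
    intro x hx
    simp [PySem.Dict.getD_counter]
  rw [hsize, hfold]
  have hmem : ∀ x ∈ PySem.List.dedup L, 1 ≤ L.count x := by
    intro x hx
    have : x ∈ L := by
      simpa using (PySem.List.mem_dedup (xs := L) (x := x)).mp hx
    exact List.count_pos_iff.mpr this
  rcases h : PySem.List.dedup L with _ | ⟨a, _ | ⟨b, rest⟩⟩
  · simp
  · simp only [List.length_cons, List.length_nil]
    have : (List.countP (fun x => decide (1 < L.count x)) [a] : Int) ≤ 1 := by
      have := List.countP_le_length (l := [a]) (p := fun x => decide (1 < L.count x))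
      simp at this ⊢; omega
    norm_num
    omega
  · rcases rest with _ | ⟨c, t⟩
    · -- exactly two distinct chunks
      have ha : 1 ≤ L.count a := hmem a (by rw [h]; simp)
      have hb : 1 ≤ L.count b := hmem b (by rw [h]; simp)
      simp only [List.length_cons, List.length_nil]
      norm_num
      rw [show PySem.List.pyGetD [a, b] 1 [] = b by
            simpa using PySem.List.pyGetD_natCast [a, b] 1 []]
      simp only [List.countP_cons, List.countP_nil]
      by_cases h1 : 1 < L.count a <;> by_cases h2 : 1 < L.count b <;>
        simp [h1, h2] <;> omega
    · simp

-- ===== VERDICT (by name: the statement is the Claim_ definition above) =====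
theorem kSubstrConcat_spec : Claim_equal_kSubstrConcat := by
  intro n s k _ hpre
  obtain ⟨hk0, hrest⟩ := hpre
  unfold Spec_kSubstrConcat kSubstrConcat kSubstrConcat_alt
  dsimp only
  by_cases hm : PySem.Int.mod n k = 0
  · rw [hm]
    rw [if_neg (show ¬(0:Int) ≠ 0 by norm_num), if_neg (show ¬(0:Int) ≠ 0 by norm_num)]
    rcases lt_trichotomy k 0 with hkneg | hkz | hkpos
    · rw [range_nil_neg n k hkneg ((hrest hm).2 hkneg)]
      simp only [List.foldl_nil, List.map_nil]
      exact decision_eq []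
    · exact absurd hkz hk0
    · by_cases hn : n ≤ 0
      · rw [range_nil_pos n k hkpos hn]
        simp only [List.foldl_nil, List.map_nil]
        exact decision_eq []
      · have hdvd : k ∣ n := (PySem.Int.mod_eq_zero_iff_dvd n k).mp hm
        have hlen : n ≤ (s.toList.length : Int) := (hrest hm).1 hkpos
        rw [PySem.List.foldl_append_singleton_eq_map]
        have hmap : (PySem.List.pyRange 0 n k).map
            (fun i => (PySem.List.pyRange 1 k 1).foldl
              (fun e j => e ++ [PySem.List.pyGetD s.toList (i + j) ' '])
              [PySem.List.pyGetD s.toList i ' '])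
            = (PySem.List.pyRange 0 n k).map
              (fun i => PySem.List.slice s.toList (some i) (some (i + k))) := by
          apply List.map_congr_left
          intro i hi
          obtain ⟨h0, hlt, hdvdi⟩ := (PySem.List.mem_pyRange_iff_of_pos hkpos i).mp hi
          have hik : i + k ≤ n := by
            have hd : k ∣ n - i := by
              simpa using dvd_sub hdvd hdvdi
            have : k ≤ n - i := Int.le_of_dvd (by omega) hd
            omega
          exact chunk_eq_slice s.toList i k (by omega) hkpos (by omega)
        rw [List.nil_append, hmap]
        exact decision_eq _
  · rw [if_pos hm, if_pos hm]
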